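-- pv_equiv track=rewrite | github.com/ylouis83/github-daily-radar | src/github_daily_radar/publish/feishu.py | _render_overview
-- ===== SOURCE A (Python) =====
-- from collections import Counter, defaultdict
--
-- def _render_overview(items: list[dict]) -> str:
--     """渲染概览统计（文字版 fallback）"""
--     counts = Counter(
--         "discussion" if item.get("kind", "other") in ("discussion", "issue", "pr") else item.get("kind", "other")
--         for item in items
--     )
--     parts = []
--     for kind, label in [("project", "项目"), ("skill", "技能"), ("discussion", "讨论")]:
--         if counts.get(kind, 0):
--             parts.append(f"**{counts[kind]}** {label}")
--     return f"今日精选 **{len(items)}** 条：{'  ·  '.join(parts)}"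
-- ===== SOURCE B (Python) =====
-- def _render_overview(items: list[dict]) -> str:
--     """渲染概览统计（文字版 fallback）"""
--     def kind(item):
--         return item.get("kind", "other")
--     project = sum(1 for item in items if kind(item) == "project")
--     skill = sum(1 for item in items if kind(item) == "skill")
--     discussion = sum(1 for item in items if kind(item) in ("discussion", "issue", "pr"))
--     parts = []
--     if project:
--         parts.append(f"**{project}** 项目")
--     if skill:
--         parts.append(f"**{skill}** 技能")
--     if discussion:
--         parts.append(f"**{discussion}** 讨论")
--     return f"今日精选 **{len(items)}** 条：{'  ·  '.join(parts)}"
-- ===== Notes on version B (the rewrite author's own statement) =====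
-- stated objective: simpler
-- what changed: Replaces the Counter built over a remapped-kind generator plus dict lookups in a loop with three independent filtered counts and three direct conditional appends, removing the Counter and the (kind,label) loop entirely.
import Mathlib
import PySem

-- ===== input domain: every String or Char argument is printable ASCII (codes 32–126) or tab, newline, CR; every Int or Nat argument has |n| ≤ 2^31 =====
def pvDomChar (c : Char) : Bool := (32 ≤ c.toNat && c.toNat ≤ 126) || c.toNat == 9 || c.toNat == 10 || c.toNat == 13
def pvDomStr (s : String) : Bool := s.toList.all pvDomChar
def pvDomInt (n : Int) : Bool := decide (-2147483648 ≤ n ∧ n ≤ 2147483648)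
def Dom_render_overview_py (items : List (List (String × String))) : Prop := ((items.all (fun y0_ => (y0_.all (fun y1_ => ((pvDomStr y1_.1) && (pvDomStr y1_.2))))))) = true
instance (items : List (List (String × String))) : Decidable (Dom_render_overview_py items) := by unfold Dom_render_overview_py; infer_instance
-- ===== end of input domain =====

-- ===== PORT A =====
-- B replaces A's Counter over a remapped-kind generator with three independent filtered
-- counts appended directly (simpler decomposition, same O(n) cost, return value only).
-- item.get("kind", "other")
def pvKind (item : List (String × String)) : String :=
  (PySem.Dict.mk item).getD "kind" "other"

-- the key each item contributes to the Counter in A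
def pvMapA (item : List (String × String)) : String :=
  if pvKind item ∈ (["discussion", "issue", "pr"] : List String) then "discussion"
  else pvKind item

def render_overview_py (items : List (List (String × String))) : String :=
  let counts := PySem.Dict.counter (items.map pvMapA)
  let parts :=
    ([("project", "项目"), ("skill", "技能"), ("discussion", "讨论")] : List (String × String)).foldl
      (fun parts kl =>
        if counts.getD kl.1 0 ≠ 0 then
          parts ++ ["**" ++ PySem.Int.toStr (counts.getD kl.1 0) ++ "** " ++ kl.2]
        else parts) []
  "今日精选 **" ++ PySem.Int.toStr (items.length : Int) ++ "** 条：" ++ PySem.Str.join "  ·  " parts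

-- ===== PORT B =====
def render_overview_py_alt (items : List (List (String × String))) : String :=
  let project : Int := (items.countP (fun item => pvKind item == "project") : Int)
  let skill : Int := (items.countP (fun item => pvKind item == "skill") : Int)
  let discussion : Int :=
    (items.countP (fun item => (["discussion", "issue", "pr"] : List String).contains (pvKind item)) : Int)
  let parts : List String :=
    (if project ≠ 0 then ["**" ++ PySem.Int.toStr project ++ "** 项目"] else []) ++
    (if skill ≠ 0 then ["**" ++ PySem.Int.toStr skill ++ "** 技能"] else []) ++
    (if discussion ≠ 0 then ["**" ++ PySem.Int.toStr discussion ++ "** 讨论"] else [])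
  "今日精选 **" ++ PySem.Int.toStr (items.length : Int) ++ "** 条：" ++ PySem.Str.join "  ·  " parts

-- ===== PRECONDITION & SPEC =====
def Spec_render_overview_py (items : List (List (String × String))) (out : String) : Prop := out = render_overview_py_alt items
instance (items : List (List (String × String))) (out : String) : Decidable (Spec_render_overview_py items out) := by unfold Spec_render_overview_py; infer_instance

-- ===== CLAIM (what is proved, stated in full; the proofs are below) =====
def Claim_equal_render_overview_py : Prop := ∀ (items : List (List (String × String))), Dom_render_overview_py items → Spec_render_overview_py items (render_overview_py items)

-- ===== LEMMAS AND PROOFS =====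
theorem counts_getD (items : List (List (String × String))) (k : String) :
    (PySem.Dict.counter (items.map pvMapA)).getD k 0 = ((items.countP (fun it => pvMapA it == k) : Nat) : Int) := by
  rw [PySem.Dict.getD_counter]
  norm_cast
  simp only [List.count_eq_countP, List.countP_map]
  rfl

theorem mapA_project (it : List (String × String)) :
    (pvMapA it == "project") = (pvKind it == "project") := by
  unfold pvMapA; split_ifs with h
  · simp at h ⊢
    rcases h with h | h | h <;> simp [h]
  · rfl

theorem mapA_skill (it : List (String × String)) :
    (pvMapA it == "skill") = (pvKind it == "skill") := by
  unfold pvMapA; split_ifs with h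
  · simp at h ⊢
    rcases h with h | h | h <;> simp [h]
  · rfl

theorem mapA_discussion (it : List (String × String)) :
    (pvMapA it == "discussion") = (["discussion", "issue", "pr"] : List String).contains (pvKind it) := by
  unfold pvMapA; split_ifs with h
  · simp at h ⊢
    tauto
  · simp at h ⊢
    push Not at h
    obtain ⟨h1, h2, h3⟩ := h
    simp [h1, h2, h3]

-- ===== VERDICT (by name: the statement is the Claim_ definition above) =====
theorem render_overview_py_spec : Claim_equal_render_overview_py := by
  intro items _
  unfold Spec_render_overview_py render_overview_py render_overview_py_alt
  simp only [List.foldl, counts_getD, mapA_project, mapA_skill, mapA_discussion,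
    List.nil_append]
  have e1 : ("** " : String) ++ "项目" = "** 项目" := rfl
  have e2 : ("** " : String) ++ "技能" = "** 技能" := rfl
  have e3 : ("** " : String) ++ "讨论" = "** 讨论" := rfl
  split_ifs <;> simp [String.append_assoc, e1, e2, e3]
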